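-- pv_equiv track=rewrite | github.com/briankaplan/tallyups | gmail_search.py | norm_text_for_match
-- ===== SOURCE A (Python) =====
-- from typing import List, Dict, Any, Optional, Tuple
--
-- def norm_text_for_match(s: Optional[str]) -> str:
--     if not s:
--         return ""
--     s = s.lower()
--     kept = []
--     for ch in s:
--         if ch.isalnum():
--             kept.append(ch)
--         elif ch.isspace():
--             kept.append(" ")
--     return " ".join("".join(kept).split())
-- ===== SOURCE B (Python) =====
-- def norm_text_for_match(s):
--     if not s:
--         return ""
--     words = []
--     for word in s.lower().split():
--         cleaned = "".join(ch for ch in word if ch.isalnum())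
--         if cleaned:
--             words.append(cleaned)
--     return " ".join(words)
-- ===== Notes on version B (the rewrite author's own statement) =====
-- stated objective: alternative
-- what changed: Tokenizes with split() first and filters alphanumerics per word (skipping words that become empty), instead of a flat per-character pass that maps whitespace to spaces and then re-splits the built string.
import Mathlib
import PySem

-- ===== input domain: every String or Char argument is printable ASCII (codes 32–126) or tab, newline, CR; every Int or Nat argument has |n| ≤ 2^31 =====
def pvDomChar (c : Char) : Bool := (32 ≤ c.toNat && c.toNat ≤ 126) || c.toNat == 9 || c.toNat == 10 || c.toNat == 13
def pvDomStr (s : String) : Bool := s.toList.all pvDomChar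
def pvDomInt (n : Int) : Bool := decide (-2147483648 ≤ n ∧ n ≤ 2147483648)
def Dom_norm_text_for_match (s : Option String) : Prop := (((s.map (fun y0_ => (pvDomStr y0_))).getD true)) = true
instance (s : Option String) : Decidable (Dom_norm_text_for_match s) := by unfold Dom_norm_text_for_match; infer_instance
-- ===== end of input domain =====

-- B tokenizes with split() first and filters alphanumerics per word (skipping emptied words),
-- instead of A's flat per-character pass that rebuilds a string and re-splits it (objective: alternative).

-- ===== PORT A =====
def norm_text_for_match (s : Option String) : String :=
  match s with
  | none => ""
  | some t =>
    if t.toList.isEmpty then ""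
    else
      let l := PySem.Chars.lower t.toList
      let kept := l.foldl (fun acc c =>
        if PySem.Chars.isalnum c then acc ++ [c]
        else if PySem.Chars.isspace c then acc ++ [' ']
        else acc) []
      String.ofList (PySem.Chars.join [' '] (PySem.Chars.split₀ kept))

-- ===== PORT B =====
def norm_text_for_match_alt (s : Option String) : String :=
  match s with
  | none => ""
  | some t =>
    if t.toList.isEmpty then ""
    else
      let words := (PySem.Chars.split₀ (PySem.Chars.lower t.toList)).foldl
        (fun ws w =>
          let cleaned := w.filter PySem.Chars.isalnum
          if cleaned.isEmpty then ws else ws ++ [cleaned]) []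
      String.ofList (PySem.Chars.join [' '] words)

-- ===== PRECONDITION & SPEC =====
def Spec_norm_text_for_match (s : Option String) (out : String) : Prop := out = norm_text_for_match_alt s
instance (s : Option String) (out : String) : Decidable (Spec_norm_text_for_match s out) := by unfold Spec_norm_text_for_match; infer_instance

-- ===== CLAIM (what is proved, stated in full; the proofs are below) =====
def Claim_equal_norm_text_for_match : Prop := ∀ (s : Option String), Dom_norm_text_for_match s → Spec_norm_text_for_match s (norm_text_for_match s)

-- ===== LEMMAS AND PROOFS =====

def pvKeep (c : Char) : Option Char :=
  if PySem.Chars.isalnum c then some c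
  else if PySem.Chars.isspace c then some ' ' else none

def pvF : List Char → List Char → List (List Char)
  | [], cur => if cur.isEmpty then [] else [cur.reverse]
  | c :: rest, cur =>
    if PySem.Chars.isalnum c then pvF rest (c :: cur)
    else if PySem.Chars.isspace c then
      (if cur.isEmpty then pvF rest [] else cur.reverse :: pvF rest [])
    else pvF rest cur

def pvG : List Char → List Char → List (List Char)
  | [], cur => if cur.isEmpty then [] else [cur.reverse]
  | c :: rest, cur =>
    if PySem.Chars.isspace c then
      (if cur.isEmpty then pvG rest [] else cur.reverse :: pvG rest [])
    else pvG rest (c :: cur)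

theorem pv_alnum_not_space (c : Char) (h : PySem.Chars.isalnum c = true) :
    PySem.Chars.isspace c = false := by
  simp only [PySem.Chars.isalnum, PySem.Chars.isalpha, PySem.Chars.isdigit,
    PySem.Chars.isupper, PySem.Chars.islower, Char.le_def, UInt32.le_iff_toNat_le,
    Bool.or_eq_true, Bool.and_eq_true, decide_eq_true_eq, Char.reduceVal, UInt32.reduceToNat] at h
  simp only [PySem.Chars.isspace, Char.toNat, Bool.or_eq_false_iff, Bool.and_eq_false_iff,
    decide_eq_false_iff_not, not_le]
  generalize c.val.toNat = n at h ⊢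
  omega

theorem pvKeep_alnum {c : Char} (h : PySem.Chars.isalnum c = true) : pvKeep c = some c := by
  simp [pvKeep, h]

theorem pvKeep_space {c : Char} (h1 : PySem.Chars.isalnum c = false)
    (h2 : PySem.Chars.isspace c = true) : pvKeep c = some ' ' := by
  simp [pvKeep, h1, h2]

theorem pvKeep_none {c : Char} (h1 : PySem.Chars.isalnum c = false)
    (h2 : PySem.Chars.isspace c = false) : pvKeep c = none := by
  simp [pvKeep, h1, h2]

theorem pv_foldl_kept (l : List Char) (acc : List Char) :
    l.foldl (fun acc c =>
      if PySem.Chars.isalnum c then acc ++ [c]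
      else if PySem.Chars.isspace c then acc ++ [' ']
      else acc) acc = acc ++ l.filterMap pvKeep := by
  induction l generalizing acc with
  | nil => simp
  | cons c rest ih =>
    simp only [List.foldl_cons]
    cases h1 : PySem.Chars.isalnum c with
    | true =>
      rw [if_pos rfl, ih, List.filterMap_cons_some (pvKeep_alnum h1)]
      simp
    | false =>
      rw [if_neg (by simp)]
      cases h2 : PySem.Chars.isspace c with
      | true =>
        rw [if_pos rfl, ih, List.filterMap_cons_some (pvKeep_space h1 h2)]
        simp
      | false =>
        rw [if_neg (by simp), ih, List.filterMap_cons_none (pvKeep_none h1 h2)]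

theorem pv_go_eq_G (l : List Char) (cur : List Char) (acc : List (List Char)) :
    PySem.Chars.split₀.go l cur acc = acc.reverse ++ pvG l cur := by
  induction l generalizing cur acc with
  | nil => simp [PySem.Chars.split₀.go, pvG]; split_ifs <;> simp
  | cons c rest ih =>
    simp only [PySem.Chars.split₀.go, pvG]
    split_ifs with h1 h2 <;> simp [ih]

theorem pv_go_kept_eq_F (l : List Char) (cur : List Char) (acc : List (List Char)) :
    PySem.Chars.split₀.go (l.filterMap pvKeep) cur acc = acc.reverse ++ pvF l cur := by
  induction l generalizing cur acc with
  | nil => simp [PySem.Chars.split₀.go, pvF]; split_ifs <;> simp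
  | cons c rest ih =>
    cases h1 : PySem.Chars.isalnum c with
    | true =>
      have hs := pv_alnum_not_space c h1
      rw [List.filterMap_cons_some (pvKeep_alnum h1)]
      simp only [PySem.Chars.split₀.go]
      rw [if_neg (by simp [hs]), ih]
      simp only [pvF]
      rw [if_pos h1]
    | false =>
      cases h2 : PySem.Chars.isspace c with
      | true =>
        rw [List.filterMap_cons_some (pvKeep_space h1 h2)]
        simp only [PySem.Chars.split₀.go]
        rw [if_pos (by decide : PySem.Chars.isspace ' ' = true)]
        simp only [pvF]
        rw [if_neg (show ¬(PySem.Chars.isalnum c = true) by simp [h1]), if_pos h2]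
        by_cases hc : cur.isEmpty = true
        · rw [if_pos hc, if_pos hc, ih]
        · rw [if_neg hc, if_neg hc, ih]
          simp
      | false =>
        rw [List.filterMap_cons_none (pvKeep_none h1 h2), ih]
        simp only [pvF]
        rw [if_neg (by simp [h1]), if_neg (by simp [h2])]

theorem pv_F_eq_filter_G (l : List Char) (cur : List Char) :
    pvF l (cur.filter PySem.Chars.isalnum) =
      ((pvG l cur).map (fun w => w.filter PySem.Chars.isalnum)).filter
        (fun w => !w.isEmpty) := by
  induction l generalizing cur with
  | nil =>
    by_cases hc : cur.isEmpty = true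
    · have h0 : cur = [] := List.isEmpty_iff.mp hc
      subst h0
      simp [pvF, pvG]
    · simp only [pvG]
      rw [if_neg hc]
      cases hf : (cur.filter PySem.Chars.isalnum).isEmpty with
      | true =>
        simp only [pvF]
        rw [if_pos hf]
        simp [List.filter_reverse, List.isEmpty_iff.mp hf]
      | false =>
        simp only [pvF]
        rw [if_neg (by simp [hf])]
        simp [List.filter_reverse, hf]
  | cons c rest ih =>
    cases h1 : PySem.Chars.isalnum c with
    | true =>
      have hs := pv_alnum_not_space c h1
      have hfc : (c :: cur).filter PySem.Chars.isalnum = c :: cur.filter PySem.Chars.isalnum := by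
        simp [h1]
      simp only [pvF, pvG]
      rw [if_pos h1, if_neg (by simp [hs]), ← hfc]
      exact ih (c :: cur)
    | false =>
      cases h2 : PySem.Chars.isspace c with
      | true =>
        simp only [pvF, pvG]
        rw [if_neg (by simp [h1]), if_pos h2, if_pos h2]
        by_cases hc : cur.isEmpty = true
        · have h0 : cur = [] := List.isEmpty_iff.mp hc
          subst h0
          rw [if_pos (by decide), if_pos (by decide)]
          exact ih []
        · rw [if_neg hc]
          cases hf : (cur.filter PySem.Chars.isalnum).isEmpty with
          | true =>
            rw [if_pos rfl]
            simp only [List.map_cons, List.filter_cons, List.filter_reverse,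
              List.isEmpty_iff.mp hf, List.reverse_nil, List.isEmpty_nil,
              Bool.not_true, Bool.false_eq_true, if_false]
            simpa using ih []
          | false =>
            rw [if_neg (by simp)]
            simp only [List.map_cons, List.filter_cons, List.filter_reverse,
              List.isEmpty_reverse, hf, Bool.not_false, if_true]
            exact congrArg (List.cons _) (by simpa using ih [])
      | false =>
        have hfc : (c :: cur).filter PySem.Chars.isalnum = cur.filter PySem.Chars.isalnum := by
          simp [h1]
        simp only [pvF, pvG]
        rw [if_neg (by simp [h1]), if_neg (by simp [h2]), if_neg (by simp [h2]), ← hfc]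
        exact ih (c :: cur)

theorem pv_foldl_words (words : List (List Char)) (ws0 : List (List Char)) :
    words.foldl (fun ws w =>
      let cleaned := w.filter PySem.Chars.isalnum
      if cleaned.isEmpty then ws else ws ++ [cleaned]) ws0 =
    ws0 ++ (words.map (fun w => w.filter PySem.Chars.isalnum)).filter
        (fun w => !w.isEmpty) := by
  induction words generalizing ws0 with
  | nil => simp
  | cons w rest ih =>
    simp only [List.foldl_cons, List.map_cons, List.filter_cons]
    cases hf : (w.filter PySem.Chars.isalnum).isEmpty with
    | true =>
      simpa using ih ws0
    | false =>
      rw [show (if (false : Bool) = true then ws0 else ws0 ++ [List.filter PySem.Chars.isalnum w])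
            = ws0 ++ [List.filter PySem.Chars.isalnum w] from rfl]
      rw [ih]
      simp

-- ===== VERDICT (by name: the statement is the Claim_ definition above) =====
theorem norm_text_for_match_spec : Claim_equal_norm_text_for_match := by
  intro s _
  unfold Spec_norm_text_for_match norm_text_for_match norm_text_for_match_alt
  match s with
  | none => rfl
  | some t =>
    by_cases ht : t.toList.isEmpty
    · simp [ht]
    · simp only [ht, Bool.false_eq_true, if_false]
      rw [pv_foldl_kept, pv_foldl_words]
      simp only [List.nil_append]
      congr 2
      unfold PySem.Chars.split₀
      rw [pv_go_kept_eq_F, pv_go_eq_G]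
      simpa using pv_F_eq_filter_G (PySem.Chars.lower t.toList) []
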